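-- pv_equiv track=rewrite | github.com/vovuhuydeveloper/agent-content-kit | backend/agents/composer/__init__.py | _pick_character
-- ===== SOURCE A (Python) =====
-- from typing import Any, Dict, List, Optional
--
-- def _pick_character(images: List[str]) -> Optional[str]:
--     for img in images:
--         if "transparent" in img.lower():
--             return img
--     for img in images:
--         if img.lower().endswith(".png"):
--             return img
--     return images[0] if images else None
-- ===== SOURCE B (Python) =====
-- from typing import List, Optional
--
-- def _pick_character(images: List[str]) -> Optional[str]:
--     first_transparent: Optional[str] = None
--     first_png: Optional[str] = None
--     for img in images:
--         if first_transparent is None and "transparent" in img.lower():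
--             first_transparent = img
--         if first_png is None and img.lower().endswith(".png"):
--             first_png = img
--     if first_transparent is not None:
--         return first_transparent
--     if first_png is not None:
--         return first_png
--     return images[0] if images else None
-- ===== Notes on version B (the rewrite author's own statement) =====
-- stated objective: alternative
-- what changed: Replaces A's two sequential scans over the list with a single pass maintaining two never-overwritten accumulators (first transparent match, first .png match) and a final priority selection.
import Mathlib
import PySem

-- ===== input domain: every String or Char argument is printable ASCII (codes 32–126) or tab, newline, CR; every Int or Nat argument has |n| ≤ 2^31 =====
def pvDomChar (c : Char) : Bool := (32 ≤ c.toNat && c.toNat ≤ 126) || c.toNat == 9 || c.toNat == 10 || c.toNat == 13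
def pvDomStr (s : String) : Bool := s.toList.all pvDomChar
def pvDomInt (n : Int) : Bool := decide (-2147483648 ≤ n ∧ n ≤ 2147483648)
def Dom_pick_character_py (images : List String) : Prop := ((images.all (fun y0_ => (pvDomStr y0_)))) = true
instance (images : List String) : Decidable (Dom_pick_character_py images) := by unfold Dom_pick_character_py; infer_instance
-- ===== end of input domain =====

-- B replaces A's two sequential scans with one pass holding two first-match accumulators; same O(n) cost (objective: alternative).

-- ===== PORT A =====
-- first loop of A: return the first img with "transparent" in img.lower()
def pvLoopTransparent : List String → Option String
  | [] => none
  | img :: rest =>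
    if PySem.Str.isIn "transparent" (PySem.Str.lower img) then some img
    else pvLoopTransparent rest

-- second loop of A: return the first img with img.lower().endswith(".png")
def pvLoopPng : List String → Option String
  | [] => none
  | img :: rest =>
    if PySem.Str.endswith (PySem.Str.lower img) ".png" then some img
    else pvLoopPng rest

def pick_character_py (images : List String) : Option String :=
  match pvLoopTransparent images with
  | some img => some img
  | none =>
    match pvLoopPng images with
    | some img => some img
    | none => match images with
      | [] => none
      | x :: _ => some x

-- ===== PORT B =====
-- one step of B's single loop: set each accumulator the first time its test matches
def pvStep (st : Option String × Option String) (img : String) : Option String × Option String :=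
  let ft := if st.1 = none ∧ PySem.Str.isIn "transparent" (PySem.Str.lower img) then some img else st.1
  let fp := if st.2 = none ∧ PySem.Str.endswith (PySem.Str.lower img) ".png" then some img else st.2
  (ft, fp)

def pick_character_py_alt (images : List String) : Option String :=
  let st := images.foldl pvStep (none, none)
  match st.1 with
  | some img => some img
  | none =>
    match st.2 with
    | some img => some img
    | none => match images with
      | [] => none
      | x :: _ => some x

-- ===== PRECONDITION & SPEC =====
def Spec_pick_character_py (images : List String) (out : Option String) : Prop := out = pick_character_py_alt images
instance (images : List String) (out : Option String) : Decidable (Spec_pick_character_py images out) := by unfold Spec_pick_character_py; infer_instance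

-- ===== CLAIM (what is proved, stated in full; the proofs are below) =====
def Claim_equal_pick_character_py : Prop := ∀ (images : List String), Dom_pick_character_py images → Spec_pick_character_py images (pick_character_py images)

-- ===== LEMMAS AND PROOFS =====

-- B's fold, started from any state, fills each empty slot with the first match of the rest
theorem pvFold_char (l : List String) : ∀ a b : Option String,
    l.foldl pvStep (a, b) =
      ((a.orElse fun _ => pvLoopTransparent l), (b.orElse fun _ => pvLoopPng l)) := by
  induction l with
  | nil => intro a b; cases a <;> cases b <;> rfl
  | cons img rest ih =>
    intro a b
    simp only [List.foldl_cons, pvStep, pvLoopTransparent, pvLoopPng]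
    cases a <;> cases b <;>
      simp [ih] <;> split_ifs <;> simp

-- ===== VERDICT (by name: the statement is the Claim_ definition above) =====
theorem pick_character_py_spec : Claim_equal_pick_character_py := by
  intro images _
  unfold Spec_pick_character_py pick_character_py pick_character_py_alt
  rw [pvFold_char images none none]
  rfl
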